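-- pv_equiv track=rewrite | github.com/creator1creeper1/RepresentationsOfSymmetricGroups | Representations of Symmetric Groups.py | is_bijective
-- ===== SOURCE A (Python) =====
-- def is_bijective(d, group_element):
--     image = set()
--     for x in range(d):
--         if group_element[x] in image:
--             return False
--         else:
--             image.add(group_element[x])
--     return True
-- ===== SOURCE B (Python) =====
-- def is_bijective(d, group_element):
--     vals = sorted(group_element[i] for i in range(d))
--     for k in range(len(vals) - 1):
--         if vals[k] == vals[k + 1]:
--             return False
--     return True
-- ===== Notes on version B (the rewrite author's own statement) =====
-- stated objective: alternative
-- what changed: B sorts the first d images and scans adjacent pairs for an equal neighbour, instead of A's hash-set with a per-element membership test and early return on the first collision.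
-- outside the precondition, e.g. on is_bijective(3, [1, 1]): A returns False, B raises IndexError
import Mathlib
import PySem

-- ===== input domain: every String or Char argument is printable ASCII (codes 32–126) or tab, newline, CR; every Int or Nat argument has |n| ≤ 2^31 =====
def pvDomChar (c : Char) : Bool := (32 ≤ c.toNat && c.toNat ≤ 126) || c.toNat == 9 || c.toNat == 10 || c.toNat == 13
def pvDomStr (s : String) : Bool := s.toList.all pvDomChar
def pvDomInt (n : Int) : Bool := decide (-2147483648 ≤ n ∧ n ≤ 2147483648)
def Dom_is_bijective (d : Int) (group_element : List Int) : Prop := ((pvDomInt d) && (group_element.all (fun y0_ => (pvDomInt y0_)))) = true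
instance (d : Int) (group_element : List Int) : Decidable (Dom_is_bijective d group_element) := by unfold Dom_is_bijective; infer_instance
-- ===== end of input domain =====

-- B sorts the first d images and scans adjacent pairs for an equal neighbour, instead of A's
-- hash-set with a per-element membership test and early return (alternative algorithm).

-- ===== PORT A =====
-- the for-loop over range(d) with the early 'return False'; state = the set 'image'
def pvLoopA (ge : List Int) (d : Int) (x : Int) (image : PySem.Set Int) : Bool :=
  if x < d then
    if PySem.Set.contains image (PySem.List.pyGetD ge x 0) then false
    else pvLoopA ge d (x + 1) (PySem.Set.add image (PySem.List.pyGetD ge x 0))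
  else true
termination_by (d - x).toNat
decreasing_by omega

def is_bijective (d : Int) (group_element : List Int) : Bool :=
  pvLoopA group_element d 0 PySem.Set.empty

-- ===== PORT B =====
-- the for-loop 'for k in range(len(vals) - 1)' with the early 'return False'
def pvLoopB (vals : List Int) (k : Int) : Bool :=
  if k < (vals.length : Int) - 1 then
    if PySem.List.pyGetD vals k 0 == PySem.List.pyGetD vals (k + 1) 0 then false
    else pvLoopB vals (k + 1)
  else true
termination_by ((vals.length : Int) - 1 - k).toNat
decreasing_by omega

def is_bijective_alt (d : Int) (group_element : List Int) : Bool :=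
  let vals : List Int :=
    PySem.List.sorted ((PySem.List.pyRange 0 d 1).map
      (fun i => PySem.List.pyGetD group_element i 0)) (fun x => x) false
  pvLoopB vals 0

-- ===== PRECONDITION & SPEC =====
-- Pre_ excludes d > len(group_element): there A raises IndexError unless a duplicate appears
-- among the in-range prefix first, and B's sorted(...) comprehension always raises IndexError.
def Pre_is_bijective (d : Int) (group_element : List Int) : Prop :=
  d ≤ (group_element.length : Int)
instance (d : Int) (group_element : List Int) : Decidable (Pre_is_bijective d group_element) := by
  unfold Pre_is_bijective; infer_instance
def pvWitness_is_bijective : Int × List Int := (2, [0, 1, 5])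

def Spec_is_bijective (d : Int) (group_element : List Int) (out : Bool) : Prop := out = is_bijective_alt d group_element
instance (d : Int) (group_element : List Int) (out : Bool) : Decidable (Spec_is_bijective d group_element out) := by unfold Spec_is_bijective; infer_instance

-- ===== CLAIM (what is proved, stated in full; the proofs are below) =====
def Claim_equal_is_bijective : Prop := ∀ (d : Int) (group_element : List Int), Dom_is_bijective d group_element → Pre_is_bijective d group_element → Spec_is_bijective d group_element (is_bijective d group_element)

-- ===== LEMMAS AND PROOFS =====

-- proof-only list form of A's loop (over an explicit list of indices)
def pvLoopL (ge : List Int) : List Int → PySem.Set Int → Bool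
  | [], _ => true
  | x :: xs, image =>
    if PySem.Set.contains image (PySem.List.pyGetD ge x 0) then false
    else pvLoopL ge xs (PySem.Set.add image (PySem.List.pyGetD ge x 0))

lemma pvLoopA_eq_pvLoopL (ge : List Int) (d : Int) :
    ∀ (n : Nat) (x : Int) (s : PySem.Set Int), (d - x).toNat = n →
      pvLoopA ge d x s = pvLoopL ge (PySem.List.pyRange x d 1) s := by
  intro n
  induction n with
  | zero =>
    intro x s hn
    rw [pvLoopA, if_neg (by omega), PySem.List.pyRange_one_eq_nil (by omega)]
    rfl
  | succ m ih =>
    intro x s hn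
    have hx : x < d := by omega
    rw [pvLoopA, if_pos hx, PySem.List.pyRange_one_cons hx]
    show _ = pvLoopL ge (x :: PySem.List.pyRange (x + 1) d 1) s
    rw [pvLoopL, ih (x + 1) (PySem.Set.add s (PySem.List.pyGetD ge x 0)) (by omega)]

-- A's loop returns True iff the mapped values are distinct and disjoint from the accumulator
lemma pv_loopL_iff (ge : List Int) (l : List Int) (s : PySem.Set Int) :
    pvLoopL ge l s = true ↔
      ((l.map (fun i => PySem.List.pyGetD ge i 0)).Nodup ∧
        ∀ v ∈ l.map (fun i => PySem.List.pyGetD ge i 0), v ∉ s) := by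
  induction l generalizing s with
  | nil => simp [pvLoopL]
  | cons x xs ih =>
    simp only [pvLoopL, List.map_cons, List.nodup_cons, List.mem_cons]
    by_cases h : PySem.Set.contains s (PySem.List.pyGetD ge x 0) = true
    · rw [if_pos h]
      rw [PySem.Set.contains_iff] at h
      constructor
      · intro hfalse; cases hfalse
      · rintro ⟨-, hall⟩
        exact absurd h (hall _ (Or.inl rfl))
    · rw [if_neg h, ih]
      rw [PySem.Set.contains_iff] at h
      constructor
      · rintro ⟨hnd, hall⟩
        refine ⟨⟨fun hmem => ?_, hnd⟩, ?_⟩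
        · have := hall _ hmem
          simp [PySem.Set.mem_add] at this
        · rintro v (rfl | hv)
          · exact h
          · intro hvs
            exact hall v hv (by simp [PySem.Set.mem_add, hvs])
      · rintro ⟨⟨hx, hnd⟩, hall⟩
        refine ⟨hnd, fun v hv hvs => ?_⟩
        rw [PySem.Set.mem_add] at hvs
        rcases hvs with hvs | rfl
        · exact hall v (Or.inr hv) hvs
        · exact hx hv

-- B's index loop returns True iff no adjacent pair (from index k on) is equal
lemma pv_loopB_iff (vals : List Int) :
    ∀ (n : Nat) (k : Int), 0 ≤ k → ((vals.length : Int) - 1 - k).toNat = n →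
      (pvLoopB vals k = true ↔
        ∀ (j : Nat) (h : j + 1 < vals.length), k ≤ (j : Int) → vals[j] ≠ vals[j + 1]) := by
  intro n
  induction n with
  | zero =>
    intro k hk hn
    rw [pvLoopB, if_neg (by omega)]
    constructor
    · intro _ j h hkj
      omega
    · intro _; rfl
  | succ m ih =>
    intro k hk hn
    have hlt : k < (vals.length : Int) - 1 := by omega
    rw [pvLoopB, if_pos hlt]
    have hk1 : k.toNat + 1 < vals.length := by omega
    have e1 : PySem.List.pyGetD vals k 0 = vals[k.toNat] :=
      PySem.List.pyGetD_eq_getElem (xs := vals) (i := k) (d := 0) hk (by omega)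
    have e2 : PySem.List.pyGetD vals (k + 1) 0 = vals[k.toNat + 1] := by
      have := PySem.List.pyGetD_eq_getElem (xs := vals) (i := k + 1) (d := 0)
        (by omega) (by omega)
      rw [this]
      congr 1
      omega
    by_cases heq : vals[k.toNat] = vals[k.toNat + 1]
    · rw [if_pos (by rw [e1, e2]; exact beq_iff_eq.mpr heq)]
      constructor
      · intro hfalse; cases hfalse
      · intro hall
        exact absurd heq (hall k.toNat hk1 (by omega))
    · rw [if_neg (by rw [e1, e2]; simpa using heq), ih (k + 1) (by omega) (by omega)]
      constructor
      · intro hall j h hkj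
        by_cases hj : k + 1 ≤ (j : Int)
        · exact hall j h hj
        · have : j = k.toNat := by omega
          subst this
          exact heq
      · intro hall j h hkj
        exact hall j h (by omega)

-- adjacent-distinct on a (≤)-sorted list is exactly Nodup
lemma pv_sorted_chain_nodup (l : List Int) (hs : l.Pairwise (· ≤ ·)) :
    (∀ (j : Nat) (h : j + 1 < l.length), l[j] ≠ l[j + 1]) ↔ l.Nodup := by
  constructor
  · intro hne
    have hle : l.IsChain (· ≤ ·) := List.isChain_iff_pairwise.mpr hs
    rw [List.isChain_iff_getElem] at hle
    have hlt : l.IsChain (· < ·) := by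
      rw [List.isChain_iff_getElem]
      intro i h
      exact lt_of_le_of_ne (hle i h) (hne i h)
    have : l.Pairwise (· < ·) := List.isChain_iff_pairwise.mp hlt
    exact this.imp ne_of_lt
  · intro hnd j h
    have hp : l.Pairwise (· ≠ ·) := hnd
    rw [List.pairwise_iff_getElem] at hp
    exact hp j (j + 1) (by omega) h (by omega)

theorem pv_main (d : Int) (group_element : List Int) :
    is_bijective d group_element = is_bijective_alt d group_element := by
  unfold is_bijective is_bijective_alt
  set vals0 := (PySem.List.pyRange 0 d 1).map
      (fun i => PySem.List.pyGetD group_element i 0) with hv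
  set vals := PySem.List.sorted vals0 (fun x => x) false with hvs
  rw [Bool.eq_iff_iff,
    pvLoopA_eq_pvLoopL group_element d (d - 0).toNat 0 _ rfl, pv_loopL_iff,
    pv_loopB_iff vals (((vals.length : Int) - 1 - 0).toNat) 0 le_rfl rfl]
  have hperm : vals.Perm vals0 := PySem.List.sorted_perm ..
  have hpw : vals.Pairwise (· ≤ ·) := by
    have := PySem.List.sorted_pairwise (xs := vals0) (key := fun x : Int => x)
    simpa using this
  have hchain := pv_sorted_chain_nodup vals hpw
  constructor
  · rintro ⟨hnd, -⟩
    intro j hj _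
    exact hchain.mpr (hperm.nodup_iff.mpr hnd) j hj
  · intro hall
    refine ⟨hperm.nodup_iff.mp (hchain.mp fun j hj => hall j hj (by omega)),
      fun v _ hv => by simp [PySem.Set.empty] at hv⟩

-- ===== VERDICT (by name: the statement is the Claim_ definition above) =====
theorem is_bijective_spec : Claim_equal_is_bijective := by
  intro d ge _ _
  unfold Spec_is_bijective
  exact pv_main d ge
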